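-- pv_equiv track=rewrite | github.com/andrewhamara/leetcode | py/2147.py | numberOfWays
-- ===== SOURCE A (Python) =====
-- def numberOfWays(corridor: str) -> int:
--     indices = [i for i,x in enumerate(corridor) if x == 'S']
--
--     length = len(indices)
--     if length < 2 or length % 2 == 1:
--         return 0
--     elif length == 2:
--         return 1
--
--     i = 2
--     possible = 1
--     while length > i:
--         possible *= indices[i] - indices[i-1]
--         i += 2
--
--     return possible % 1000000007
-- ===== SOURCE B (Python) =====
-- def numberOfWays(corridor: str) -> int:
--     seats = 0
--     plants = 0
--     ways = 1
--     for c in corridor: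
--         if c == 'S':
--             seats += 1
--             if seats % 2 == 1 and seats > 1:
--                 ways *= plants + 1
--                 plants = 0
--         elif seats > 0 and seats % 2 == 0:
--             plants += 1
--     if seats >= 2 and seats % 2 == 0:
--         return ways % 1000000007
--     return 0
-- ===== Notes on version B (the rewrite author's own statement) =====
-- stated objective: simpler
-- what changed: Replaced the two-phase algorithm (build the full list of seat indices, then a second strided pass multiplying index differences) by one left-to-right pass over the string keeping only a seat counter, a plants-between-pair counter and a running product.
import Mathlib
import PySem

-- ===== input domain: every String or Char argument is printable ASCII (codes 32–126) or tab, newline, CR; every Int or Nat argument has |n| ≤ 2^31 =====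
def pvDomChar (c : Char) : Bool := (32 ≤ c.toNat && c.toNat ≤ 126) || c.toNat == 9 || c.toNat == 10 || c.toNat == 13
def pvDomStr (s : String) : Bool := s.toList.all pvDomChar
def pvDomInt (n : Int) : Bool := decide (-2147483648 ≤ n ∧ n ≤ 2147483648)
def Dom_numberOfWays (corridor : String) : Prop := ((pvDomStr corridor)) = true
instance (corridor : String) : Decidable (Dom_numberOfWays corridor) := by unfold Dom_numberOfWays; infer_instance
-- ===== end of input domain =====

-- B replaces A's index-list + strided second pass by a single O(1)-space pass; objective: simpler.

-- ===== PORT A =====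
-- indices = [i for i,x in enumerate(corridor) if x == 'S']
def pvAIndices (corridor : String) : List Int :=
  ((PySem.List.enumerate corridor.toList 0).filter (fun p => p.2 == 'S')).map (·.1)

-- while length > i: possible *= indices[i] - indices[i-1]; i += 2
-- (indices[i] ported with pyGetD …  0: always in range here since 2 ≤ i < length)
def pvAWhile (indices : List Int) (length : Int) (i : Int) (possible : Int) : Int :=
  if _h : length > i then
    pvAWhile indices length (i + 2)
      (possible * (PySem.List.pyGetD indices i 0 - PySem.List.pyGetD indices (i - 1) 0))
  else possible
termination_by (length - i).toNat
decreasing_by omega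

def numberOfWays (corridor : String) : Int :=
  let indices := pvAIndices corridor
  let length : Int := indices.length
  if length < 2 ∨ PySem.Int.mod length 2 = 1 then 0
  else if length = 2 then 1
  else PySem.Int.mod (pvAWhile indices length 2 1) 1000000007

-- ===== PORT B =====
-- state (seats, plants, ways)
def pvBStep (st : Int × Int × Int) (c : Char) : Int × Int × Int :=
  let (seats, plants, ways) := st
  if c == 'S' then
    let seats := seats + 1
    if PySem.Int.mod seats 2 = 1 ∧ seats > 1 then (seats, 0, ways * (plants + 1))
    else (seats, plants, ways)
  else if seats > 0 ∧ PySem.Int.mod seats 2 = 0 then (seats, plants + 1, ways)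
  else (seats, plants, ways)

def numberOfWays_alt (corridor : String) : Int :=
  let st := corridor.toList.foldl pvBStep (0, 0, 1)
  if st.1 ≥ 2 ∧ PySem.Int.mod st.1 2 = 0 then PySem.Int.mod st.2.2 1000000007 else 0

-- ===== PRECONDITION & SPEC =====
def Spec_numberOfWays (corridor : String) (out : Int) : Prop := out = numberOfWays_alt corridor
instance (corridor : String) (out : Int) : Decidable (Spec_numberOfWays corridor out) := by unfold Spec_numberOfWays; infer_instance

-- ===== CLAIM (what is proved, stated in full; the proofs are below) =====
def Claim_equal_numberOfWays : Prop := ∀ (corridor : String), Dom_numberOfWays corridor → Spec_numberOfWays corridor (numberOfWays corridor)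

-- ===== LEMMAS AND PROOFS =====

-- product of (y-x) over consecutive disjoint pairs of the list
def prodPairs : List Int → Int
  | [] => 1
  | [_] => 1
  | x :: y :: rest => (y - x) * prodPairs rest

def pvIdx (l : List Char) : List Int :=
  ((PySem.List.enumerate l 0).filter (fun p => p.2 == 'S')).map (·.1)

def pvLast (l : List Char) : Int := ((pvIdx l).getLast?).getD 0

def pvPlantsSpec (l : List Char) : Int :=
  if (pvIdx l).length % 2 = 0 ∧ 0 < (pvIdx l).length
  then (l.length : Int) - 1 - pvLast l else 0

lemma pvIdx_append (l : List Char) (c : Char) :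
    pvIdx (l ++ [c]) = pvIdx l ++ (if c == 'S' then [(l.length : Int)] else []) := by
  simp [pvIdx, PySem.List.enumerate_append, PySem.List.enumerate_cons,
        PySem.List.enumerate_nil, List.filter_append]
  split <;> simp_all

lemma prodPairs_append_even (xs : List Int) (n : Int) (h : xs.length % 2 = 0) :
    prodPairs (xs ++ [n]) = prodPairs xs := by
  induction xs using prodPairs.induct with
  | case1 => simp [prodPairs]
  | case2 x => simp at h
  | case3 x y rest ih =>
    have h' : rest.length % 2 = 0 := by simp at h; omega
    simp [prodPairs, ih h']

lemma prodPairs_append_odd (xs : List Int) (n : Int) (h : xs.length % 2 = 1) :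
    prodPairs (xs ++ [n]) = prodPairs xs * (n - (xs.getLast?).getD 0) := by
  induction xs using prodPairs.induct with
  | case1 => simp at h
  | case2 x => simp [prodPairs]
  | case3 x y rest ih =>
    have h' : rest.length % 2 = 1 := by simp at h; omega
    have hne : rest ≠ [] := by intro hh; rw [hh] at h'; simp at h'
    obtain ⟨r, rs, rfl⟩ := List.exists_cons_of_ne_nil hne
    simp only [List.cons_append, prodPairs, List.getLast?_cons_cons] at ih ⊢
    rw [ih h']
    ring

lemma getLastD_drop_one (xs : List Int) (h : 2 ≤ xs.length) :
    (xs.tail.getLast?).getD 0 = (xs.getLast?).getD 0 := by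
  match xs, h with
  | x :: y :: t, _ => simp [List.getLast?_cons_cons]

lemma drop_one_append (xs : List Int) (n : Int) (h : xs ≠ []) :
    (xs ++ [n]).drop 1 = xs.drop 1 ++ [n] := by
  cases xs with
  | nil => simp at h
  | cons x t => simp

lemma pvInv (l : List Char) :
    l.foldl pvBStep (0, 0, 1) =
      (((pvIdx l).length : Int), pvPlantsSpec l, prodPairs ((pvIdx l).drop 1)) := by
  induction l using List.reverseRecOn with
  | nil => simp [pvIdx, pvPlantsSpec, pvLast, prodPairs, PySem.List.enumerate_nil]
  | append_singleton l c ih =>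
    rw [List.foldl_append, ih, List.foldl_cons, List.foldl_nil]
    have hidx := pvIdx_append l c
    have hmod : ∀ m : Nat, PySem.Int.mod ((m : Nat) : Int) 2 = ((m % 2 : Nat) : Int) :=
      fun m => by exact_mod_cast PySem.Int.mod_natCast m 2
    have hcast : ∀ m : Nat, ((m : Nat) : Int) + 1 = (((m + 1 : Nat) : Nat) : Int) := by
      intro m; push_cast; ring
    by_cases hc : (c == 'S') = true
    · rw [if_pos hc] at hidx
      have hS : c = 'S' := by simpa using hc
      subst hS
      rcases Nat.eq_zero_or_pos (pvIdx l).length with h0 | hpos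
      · have hnil : pvIdx l = [] := List.length_eq_zero_iff.mp h0
        simp [pvBStep, pvPlantsSpec, pvLast, prodPairs, hidx, hnil, hmod, hcast]
      · by_cases hpar : (pvIdx l).length % 2 = 0
        · -- s even and positive: a pair opens; B multiplies
          have hne : pvIdx l ≠ [] := by intro h; rw [h] at hpos; simp at hpos
          have h2 : 2 ≤ (pvIdx l).length := by omega
          have hdrop := drop_one_append (pvIdx l) ((l.length : Nat) : Int) hne
          have hodd : ((pvIdx l).drop 1).length % 2 = 1 := by
            rw [List.length_drop]; omega
          simp only [pvBStep, pvPlantsSpec, pvLast, hidx, hcast, hmod]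
          simp [hpar, hdrop, hpos, Nat.add_mod, pvPlantsSpec, pvLast]
          rw [prodPairs_append_odd _ _ (by simpa using hodd), getLastD_drop_one _ h2]
          ring
        · -- s odd: B just seats the second of a pair
          have hne : pvIdx l ≠ [] := by intro h; rw [h] at hpos; simp at hpos
          have hdrop := drop_one_append (pvIdx l) ((l.length : Nat) : Int) hne
          have heven : ((pvIdx l).drop 1).length % 2 = 0 := by
            rw [List.length_drop]; omega
          simp only [pvBStep, pvPlantsSpec, pvLast, hidx, hcast, hmod]
          simp [hpar, hdrop, hpos, Nat.add_mod, pvPlantsSpec, pvLast]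
          rw [prodPairs_append_even _ _ (by simpa using heven)]
    · rw [if_neg hc] at hidx
      simp only [List.append_nil] at hidx
      simp only [pvBStep, hc]
      by_cases hcond : ((pvIdx l).length : Int) > 0 ∧
          PySem.Int.mod ((pvIdx l).length : Int) 2 = 0
      · simp only [if_pos hcond, hidx]
        have hpos : 0 < (pvIdx l).length := by exact_mod_cast hcond.1
        have hpar : (pvIdx l).length % 2 = 0 := by
          have := hcond.2; rw [hmod] at this; exact_mod_cast this
        simp [pvPlantsSpec, pvLast, hpos, hpar, hidx]
        push_cast
        ring
      · simp only [if_neg hcond, hidx]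
        have : ¬ ((pvIdx l).length % 2 = 0 ∧ 0 < (pvIdx l).length) := by
          intro ⟨h1, h2⟩
          exact hcond ⟨by exact_mod_cast h2, by rw [hmod]; exact_mod_cast h1⟩
        simp [pvPlantsSpec, pvLast, this, hidx]

lemma prodPairs_short (xs : List Int) (h : xs.length ≤ 1) : prodPairs xs = 1 := by
  match xs with
  | [] => rfl
  | [x] => rfl
  | x :: y :: r => simp at h

-- A-side: the while loop computes the pair products of the dropped prefix
lemma pvAWhile_eq (idx : List Int) :
    ∀ (n k : Nat) (p : Int), idx.length - k = n → 1 ≤ k →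
      pvAWhile idx (idx.length : Int) (k : Int) p = p * prodPairs (idx.drop (k - 1)) := by
  intro n
  induction n using Nat.strong_induction_on with
  | _ n ih =>
    intro k p hn hk
    by_cases hlt : k < idx.length
    · rw [pvAWhile, dif_pos (by push_cast; omega)]
      have e1 : (k : Int) - 1 = ((k - 1 : Nat) : Int) := (Nat.cast_sub hk).symm
      have g1 : PySem.List.pyGetD idx ((k : Nat) : Int) 0 = idx[k] := by
        rw [PySem.List.pyGetD_natCast]; exact List.getD_eq_getElem idx 0 hlt
      have g0 : PySem.List.pyGetD idx ((k : Int) - 1) 0 = idx[k - 1] := by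
        rw [e1, PySem.List.pyGetD_natCast]; exact List.getD_eq_getElem idx 0 (by omega)
      have e2 : (k : Int) + 2 = ((k + 2 : Nat) : Int) := by push_cast; ring
      rw [g1, g0, e2]
      have hrec := ih (idx.length - (k + 2)) (by omega) (k + 2)
        (p * (idx[k] - idx[k - 1])) rfl (by omega)
      rw [hrec]
      have hk1 : k - 1 + 1 = k := by omega
      have hd : idx.drop (k - 1) = idx[k - 1] :: idx[k] :: idx.drop (k + 1) := by
        rw [List.drop_eq_getElem_cons (by omega : k - 1 < idx.length), hk1,
            List.drop_eq_getElem_cons hlt]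
      have hd2 : k + 2 - 1 = k + 1 := by omega
      rw [hd, hd2]
      simp only [prodPairs]
      ring
    · rw [pvAWhile, dif_neg (by push_cast; omega)]
      rw [prodPairs_short _ (by rw [List.length_drop]; omega)]
      ring

-- ===== VERDICT (by name: the statement is the Claim_ definition above) =====
theorem numberOfWays_spec : Claim_equal_numberOfWays := by
  intro corridor _
  unfold Spec_numberOfWays numberOfWays numberOfWays_alt
  have hidx : pvAIndices corridor = pvIdx corridor.toList := rfl
  rw [hidx, pvInv corridor.toList]
  have hmod : PySem.Int.mod ((pvIdx corridor.toList).length : Int) 2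
      = (((pvIdx corridor.toList).length % 2 : Nat) : Int) := by
    exact_mod_cast PySem.Int.mod_natCast (pvIdx corridor.toList).length 2
  set idx := pvIdx corridor.toList with hix
  set s := idx.length with hslen
  by_cases h1 : ((s : Nat) : Int) < 2 ∨ PySem.Int.mod ((s : Nat) : Int) 2 = 1
  · rw [if_pos h1]
    have hcond : ¬ (((s : Nat) : Int) ≥ 2 ∧ PySem.Int.mod ((s : Nat) : Int) 2 = 0) := by
      rw [hmod] at h1 ⊢
      rcases h1 with h | h
      · intro hh; omega
      · intro hh
        have a1 : s % 2 = 1 := by exact_mod_cast h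
        have a0 : s % 2 = 0 := by exact_mod_cast hh.2
        omega
    simp only [if_neg hcond]
  · rw [if_neg h1]
    push Not at h1
    have hs2 : 2 ≤ s := by exact_mod_cast h1.1
    have hse : s % 2 = 0 := by
      rw [hmod] at h1
      have := h1.2
      have h01 : s % 2 = 0 ∨ s % 2 = 1 := Nat.mod_two_eq_zero_or_one s
      rcases h01 with h | h
      · exact h
      · exfalso; apply this; exact_mod_cast congrArg (Nat.cast : Nat → Int) h
    have hcond : (((s : Nat) : Int) ≥ 2 ∧ PySem.Int.mod ((s : Nat) : Int) 2 = 0) := by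
      refine ⟨h1.1, ?_⟩
      rw [hmod]
      exact_mod_cast congrArg (Nat.cast : Nat → Int) hse
    rw [if_pos hcond]
    by_cases h2 : ((s : Nat) : Int) = 2
    · rw [if_pos h2]
      have hs : s = 2 := by exact_mod_cast h2
      have hshort : prodPairs (idx.drop 1) = 1 :=
        prodPairs_short _ (by rw [List.length_drop]; omega)
      have hm1 : PySem.Int.mod (1 : Int) 1000000007 = 1 := by decide
      have ht : prodPairs idx.tail = 1 := by rw [← List.drop_one]; exact hshort
      simp [ht]
    · rw [if_neg h2]
      have e2 : (2 : Int) = ((2 : Nat) : Int) := by norm_num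
      have hw := pvAWhile_eq idx (s - 2) 2 1 rfl (by omega)
      rw [e2, hw, one_mul]
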